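-- pv_equiv track=rewrite | github.com/openghg/openghg | hugs/Acquire/Registry/_registry.py | _inc_uid
-- ===== SOURCE A (Python) =====
-- def _inc_uid(vals):
--     import copy as _copy
--     vals = _copy.copy(vals)
--
--     for j in range(0, len(vals)):
--         i = len(vals) - j - 1
--         vals[i] += 1
--
--         if i % 2 == 1:
--             if vals[i] < 10:
--                 return vals
--             else:
--                 vals[i] = 0
--         else:
--             if vals[i] < 52:
--                 return vals
--             else:
--                 vals[i] = 0
--
--     # we only get here if we have overflowed. In this
--     # case, add an extra pair of digits
--     vals = [0] * (len(vals) + 2)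
--
--     return vals
-- ===== SOURCE B (Python) =====
-- def _inc_uid(vals):
--     # Single left-to-right scan recording the LAST index whose digit still has room
--     # (d+1 below its radix: 10 on odd positions, 52 on even); then the result is built
--     # by slicing: prefix unchanged, that digit +1, zeros after it. No mutation, no carry.
--     pivot = -1
--     for i, d in enumerate(vals):
--         if d + 1 < (10 if i % 2 == 1 else 52):
--             pivot = i
--     if pivot < 0:
--         return [0] * (len(vals) + 2)
--     return vals[:pivot] + [vals[pivot] + 1] + [0] * (len(vals) - pivot - 1)
-- ===== Notes on version B (the rewrite author's own statement) =====
-- stated objective: alternative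
-- what changed: Replaces A's right-to-left in-place increment-and-carry loop (mutate digit, test, zero on overflow, early return) by a single left-to-right enumerate scan that records the last position whose digit has room, then builds the result functionally by slicing: unchanged prefix + incremented digit + zero suffix; no mutation and no carry propagation.
import Mathlib
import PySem

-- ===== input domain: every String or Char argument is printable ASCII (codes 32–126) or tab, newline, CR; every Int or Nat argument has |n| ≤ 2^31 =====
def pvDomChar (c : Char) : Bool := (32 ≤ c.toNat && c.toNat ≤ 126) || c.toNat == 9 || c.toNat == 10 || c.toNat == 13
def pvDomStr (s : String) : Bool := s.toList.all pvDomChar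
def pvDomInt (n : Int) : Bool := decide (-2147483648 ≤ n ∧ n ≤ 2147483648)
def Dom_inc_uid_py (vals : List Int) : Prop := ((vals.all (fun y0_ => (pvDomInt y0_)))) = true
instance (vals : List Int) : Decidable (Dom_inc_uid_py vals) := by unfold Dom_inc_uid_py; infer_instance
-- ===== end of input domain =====

-- B replaces A's right-to-left in-place increment-and-carry loop by one left-to-right scan
-- recording the last position whose digit has room, then builds the result by slicing
-- (prefix ++ incremented digit ++ zeros) — no mutation, no carry (alternative).

-- ===== PORT A =====
-- A's for-loop over j in range(0, len(vals)) with early return; the list is mutated in place,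
-- modeled by threading `vals` (List.set keeps the length, as Python's assignment does).
def incUidLoopA (vals : List Int) : List Nat → List Int
  | [] => List.replicate (vals.length + 2) 0
  | j :: rest =>
      let i := vals.length - j - 1
      let v := vals.getD i 0 + 1
      if i % 2 == 1 then
        if v < 10 then vals.set i v
        else incUidLoopA (vals.set i 0) rest
      else
        if v < 52 then vals.set i v
        else incUidLoopA (vals.set i 0) rest

def inc_uid_py (vals : List Int) : List Int :=
  incUidLoopA vals (List.range vals.length)

-- ===== PORT B =====
-- B's `for i, d in enumerate(vals)` loop keeping the last index with room, then the
-- slice-built result vals[:pivot] + [vals[pivot]+1] + [0]*(len-pivot-1) (pivot -1 = none).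
def inc_uid_py_alt (vals : List Int) : List Int :=
  let pivot := (PySem.List.enumerate vals 0).foldl
    (fun p x => if x.2 + 1 < (if x.1 % 2 == 1 then (10 : Int) else 52) then x.1 else p) (-1)
  if pivot < 0 then List.replicate (vals.length + 2) 0
  else vals.take pivot.toNat ++ [vals.getD pivot.toNat 0 + 1]
       ++ List.replicate (vals.length - pivot.toNat - 1) 0

-- ===== PRECONDITION & SPEC =====
def Spec_inc_uid_py (vals : List Int) (out : List Int) : Prop := out = inc_uid_py_alt vals
instance (vals : List Int) (out : List Int) : Decidable (Spec_inc_uid_py vals out) := by unfold Spec_inc_uid_py; infer_instance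

-- ===== CLAIM (what is proved, stated in full; the proofs are below) =====
def Claim_equal_inc_uid_py : Prop := ∀ (vals : List Int), Dom_inc_uid_py vals → Spec_inc_uid_py vals (inc_uid_py vals)

-- ===== LEMMAS AND PROOFS =====

-- proof-only helper: rightmost index below the bound whose digit still has room
-- (the common characterization both ports are reduced to)
def incUidScan (vals : List Int) : Nat → Option Nat
  | 0 => none
  | n + 1 =>
      if vals.getD n 0 ≥ (if n % 2 == 1 then (9 : Int) else 51) then incUidScan vals n
      else some n

-- the scan ignores positions at or above its bound
lemma incUidScan_set (n : Nat) (vals : List Int) (j : Nat) (v : Int) (hj : n ≤ j) :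
    incUidScan (vals.set j v) n = incUidScan vals n := by
  induction n with
  | zero => rfl
  | succ m ih =>
      simp only [incUidScan, List.getD_eq_getElem?_getD, List.getElem?_set,
        show j ≠ m by omega, reduceIte]
      rw [ih (by omega)]

-- the index the scan returns is below its bound
lemma incUidScan_lt (n : Nat) (vals : List Int) (i : Nat) :
    incUidScan vals n = some i → i < n := by
  induction n with
  | zero => intro h; simp [incUidScan] at h
  | succ m ih =>
      intro h
      rw [incUidScan] at h
      by_cases hc : vals.getD m 0 ≥ (if m % 2 == 1 then (9 : Int) else 51)
      · rw [if_pos hc] at h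
        exact Nat.lt_succ_of_lt (ih h)
      · rw [if_neg hc] at h
        simp at h
        omega

-- A-side invariant: with n iterations left (indices n-1 … 0 still to visit) and every position
-- ≥ n already zero, A's loop computes the scan-then-zero-fill form.
lemma incUid_main (n : Nat) : ∀ (vals : List Int), n ≤ vals.length →
    (∀ k, n ≤ k → (h : k < vals.length) → vals[k] = 0) →
    incUidLoopA vals (List.range' (vals.length - n) n) =
      (match incUidScan vals n with
       | none => List.replicate (vals.length + 2) 0
       | some i => (vals.set i (vals.getD i 0 + 1)).take (i + 1)
            ++ List.replicate (vals.length - (i + 1)) 0) := by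
  induction n with
  | zero => intro vals _ _; rfl
  | succ m ih =>
      intro vals hlen hzero
      rw [List.range'_succ, incUidLoopA]
      have hi : vals.length - (vals.length - (m + 1)) - 1 = m := by omega
      rw [hi]
      have hm : m < vals.length := by omega
      -- the early return equals its take/replicate form, since positions > m are zero
      have hret : ∀ v : Int, vals.set m v =
          (vals.set m v).take (m + 1) ++ List.replicate (vals.length - (m + 1)) 0 := by
        intro v
        have hdrop : (vals.set m v).drop (m + 1) = List.replicate (vals.length - (m + 1)) 0 := by
          apply List.ext_getElem
          · simp
          · intro k hk1 hk2
            simp only [List.getElem_drop, List.getElem_set, List.getElem_replicate]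
            rw [if_neg (by omega)]
            exact hzero _ (by omega) _
        conv_lhs => rw [← List.take_append_drop (m + 1) (vals.set m v)]
        rw [hdrop]
      -- the carry case: recurse with position m zeroed
      have hcarry :
          incUidLoopA (vals.set m 0) (List.range' (vals.length - (m + 1) + 1) m) =
            (match incUidScan vals m with
             | none => List.replicate (vals.length + 2) 0
             | some i => (vals.set i (vals.getD i 0 + 1)).take (i + 1)
                  ++ List.replicate (vals.length - (i + 1)) 0) := by
        have harg : vals.length - (m + 1) + 1 = (vals.set m 0).length - m := by simp; omega
        rw [harg, ih (vals.set m 0) (by simp; omega)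
          (by intro k hk hklen
              simp only [List.getElem_set]
              split
              · rfl
              · exact hzero k (by omega) (by simpa using hklen))]
        rw [incUidScan_set m vals m 0 (le_refl m)]
        cases hscan : incUidScan vals m with
        | none => simp
        | some i =>
            have hilt := incUidScan_lt m vals i hscan
            have hgd : (vals.set m 0).getD i 0 = vals.getD i 0 := by
              simp [List.getD_eq_getElem?_getD, show m ≠ i by omega]
            simp only [hgd, List.length_set]
            congr 1
            apply List.ext_getElem
            · simp
            · intro k hk1 hk2
              have hki : k < i + 1 := by simp at hk1; omega
              simp [List.getElem_take, List.getElem_set, show m ≠ k by omega]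
      -- split on this iteration's branch structure
      simp only [incUidScan]
      by_cases hodd : m % 2 == 1
      · simp only [hodd, reduceIte]
        by_cases hlt : vals.getD m 0 + 1 < 10
        · rw [if_pos hlt, if_neg (by omega)]
          exact hret _
        · rw [if_neg hlt, if_pos (by omega)]
          exact hcarry
      · simp only [hodd, Bool.false_eq_true, reduceIte]
        by_cases hlt : vals.getD m 0 + 1 < 52
        · rw [if_pos hlt, if_neg (by omega)]
          exact hret _
        · rw [if_neg hlt, if_pos (by omega)]
          exact hcarry

-- B-side: the left-to-right last-match fold over the first n entries computes the
-- right-to-left scan's answer (order does not matter: both are 'rightmost with room')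
lemma incUid_fold_eq_scan (vals : List Int) (n : Nat) (hn : n ≤ vals.length) (p : Int) :
    ((PySem.List.enumerate vals 0).take n).foldl
      (fun p x => if x.2 + 1 < (if x.1 % 2 == 1 then (10 : Int) else 52) then x.1 else p) p =
      (match incUidScan vals n with | none => p | some i => (i : Int)) := by
  induction n generalizing p with
  | zero => rfl
  | succ m ih =>
      have hm : m < vals.length := by omega
      have hmE : m < (PySem.List.enumerate vals 0).length := by
        simpa [PySem.List.length_enumerate] using hm
      have hsplit : ((PySem.List.enumerate vals 0).take (m + 1)) =
          ((PySem.List.enumerate vals 0).take m) ++ [((m : Int), vals[m])] := by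
        rw [List.take_add_one, List.getElem?_eq_getElem hmE]
        simp [PySem.List.getElem_enumerate]
      rw [hsplit, List.foldl_append]
      simp only [List.foldl_cons, List.foldl_nil]
      have hpar : (((m : Int) % 2 == 1) : Bool) = ((m % 2 == 1) : Bool) := by
        by_cases h : m % 2 = 1
        · simp [h, show (m : Int) % 2 = 1 by omega]
        · have h0 : m % 2 = 0 := by omega
          simp [h0, show (m : Int) % 2 = 0 by omega]
      have hget : vals.getD m 0 = vals[m] := List.getD_eq_getElem vals 0 hm
      rw [incUidScan]
      by_cases hroom : vals[m] + 1 < (if m % 2 == 1 then (10 : Int) else 52)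
      · rw [if_pos (by rw [hpar]; exact hroom),
          if_neg (by rw [hget]; by_cases ho : m % 2 == 1 <;> simp [ho] at hroom ⊢ <;> omega)]
      · rw [if_neg (by rw [hpar]; exact hroom),
          if_pos (by rw [hget]; by_cases ho : m % 2 == 1 <;> simp [ho] at hroom ⊢ <;> omega)]
        exact ih (by omega) p

-- (vals.set i v).take (i+1) is the unchanged prefix plus the new digit
lemma incUid_take_set (vals : List Int) (i : Nat) (v : Int) (hi : i < vals.length) :
    (vals.set i v).take (i + 1) = vals.take i ++ [v] := by
  rw [List.take_add_one]
  congr 1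
  · apply List.ext_getElem
    · simp
    · intro k hk1 hk2
      simp only [List.getElem_take, List.getElem_set]
      rw [if_neg (by simp at hk1; omega)]
  · simp [hi]

-- ===== VERDICT (by name: the statement is the Claim_ definition above) =====
theorem inc_uid_py_spec : Claim_equal_inc_uid_py := by
  intro vals _
  unfold Spec_inc_uid_py inc_uid_py inc_uid_py_alt
  have hA := incUid_main vals.length vals (le_refl _) (by intro k hk hlt; omega)
  rw [show List.range vals.length = List.range' (vals.length - vals.length) vals.length by
    simp [List.range_eq_range']]
  rw [hA]
  have hB := incUid_fold_eq_scan vals vals.length (le_refl _) (-1)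
  rw [List.take_of_length_le (by simp [PySem.List.length_enumerate])] at hB
  simp only [hB]
  cases hscan : incUidScan vals vals.length with
  | none => simp
  | some i =>
      have hilt := incUidScan_lt _ vals i hscan
      simp only [show ¬ ((i : Int) < 0) by omega, if_false, Int.toNat_natCast]
      rw [incUid_take_set vals i _ hilt]
      simp [List.append_assoc, Nat.sub_sub]
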